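-- pv_equiv track=rewrite | github.com/Arsen1302/Code-copy-detector | TestData/solutions/problem_1531_2.py | solution_1531_2
-- ===== SOURCE A (Python) =====
-- def solution_1531_2(s: str) -> int:
--     prefix = []
--     one = zero = 0
--     for c in s:                                # find number of 0 or 1 before index `i`
--         prefix.append([zero, one])
--         if c == '1':
--             one += 1
--         else:
--             zero += 1
--     suffix = []
--     one = zero = 0
--     for c in s[::-1]:                          # find number of 0 or 1 after index `i`
--         suffix.append([zero, one])
--         if c == '1':
--             one += 1
--         else:
--             zero += 1
--     suffix = suffix[::-1]                      # reverse since we trace from right to left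
--     ans = 0
--     for i, c in enumerate(s):                  # for c=='1' number of combination is prefix[i][0] * suffix[i][0] ([0 before index `i`] * [0 after index `i`])
--         if c == '1':
--             ans += prefix[i][0] * suffix[i][0]
--         else:
--             ans += prefix[i][1] * suffix[i][1]
--     return ans
-- ===== SOURCE B (Python) =====
-- def solution_1531_2(s: str) -> int:
--     total_ones = sum(1 for c in s if c == '1')
--     total_zeros = len(s) - total_ones
--     ans = pz = po = 0
--     for c in s:
--         if c == '1':
--             ans += pz * (total_zeros - pz)
--             po += 1
--         else:
--             ans += po * (total_ones - po)
--             pz += 1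
--     return ans
-- ===== Notes on version B (the rewrite author's own statement) =====
-- stated objective: simpler
-- what changed: Replaces the three passes with prefix/suffix pair-lists and reversed traversal by one totals count plus a single forward pass keeping only two running counters, deriving suffix counts by subtraction from the totals.
import Mathlib
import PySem

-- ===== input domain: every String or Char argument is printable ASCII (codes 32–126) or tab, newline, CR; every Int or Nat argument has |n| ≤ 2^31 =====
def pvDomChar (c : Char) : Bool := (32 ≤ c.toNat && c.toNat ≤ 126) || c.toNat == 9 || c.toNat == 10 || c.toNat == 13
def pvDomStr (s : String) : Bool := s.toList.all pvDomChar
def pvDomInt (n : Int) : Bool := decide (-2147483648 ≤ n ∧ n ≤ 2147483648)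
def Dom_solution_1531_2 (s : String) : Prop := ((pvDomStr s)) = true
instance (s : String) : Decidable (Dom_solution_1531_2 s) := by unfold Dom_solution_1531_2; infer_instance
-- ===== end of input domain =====

-- B replaces A's three passes (prefix list, reversed suffix list, indexed sum) by one
-- totals count plus a single forward pass with two running counters (objective: simpler).

-- ===== PORT A =====
-- the first two loops of A: build the list of (zero, one) counts seen so far
def pvBuildPref : List Char → Int → Int → List (Int × Int)
  | [], _, _ => []
  | c :: t, z, o =>
      (z, o) :: pvBuildPref t (if c == '1' then z else z + 1) (if c == '1' then o + 1 else o)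

def solution_1531_2 (s : String) : Int :=
  let l := s.toList
  let pre := pvBuildPref l 0 0
  -- s[::-1] is the reverse of the string (PySem.Str.slice?_none_none_neg_one)
  let suf := (pvBuildPref l.reverse 0 0).reverse
  -- for i, c in enumerate(s): prefix[i] / suffix[i]; i is always in range, so the default is unreachable
  (PySem.List.enumerate l 0).foldl
    (fun ans ic =>
      let p := PySem.List.pyGetD pre ic.1 ((0 : Int), (0 : Int))
      let q := PySem.List.pyGetD suf ic.1 ((0 : Int), (0 : Int))
      if ic.2 == '1' then ans + p.1 * q.1 else ans + p.2 * q.2) 0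

-- ===== PORT B =====
def solution_1531_2_alt (s : String) : Int :=
  let l := s.toList
  let totalOnes : Int := l.foldl (fun a c => if c == '1' then a + 1 else a) 0
  let totalZeros : Int := (l.length : Int) - totalOnes
  -- state (ans, pz, po)
  let r := l.foldl
    (fun st c =>
      if c == '1' then (st.1 + st.2.1 * (totalZeros - st.2.1), st.2.1, st.2.2 + 1)
      else (st.1 + st.2.2 * (totalOnes - st.2.2), st.2.1 + 1, st.2.2))
    ((0 : Int), (0 : Int), (0 : Int))
  r.1

-- ===== PRECONDITION & SPEC =====
def Spec_solution_1531_2 (s : String) (out : Int) : Prop := out = solution_1531_2_alt s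
instance (s : String) (out : Int) : Decidable (Spec_solution_1531_2 s out) := by unfold Spec_solution_1531_2; infer_instance

-- ===== CLAIM (what is proved, stated in full; the proofs are below) =====
def Claim_equal_solution_1531_2 : Prop := ∀ (s : String), Dom_solution_1531_2 s → Spec_solution_1531_2 s (solution_1531_2 s)

-- ===== LEMMAS AND PROOFS =====

-- zeros / ones of a char list, as Int
def pvZ (l : List Char) : Int := (l.countP (fun c => !(c == '1')) : Int)
def pvO (l : List Char) : Int := (l.count '1' : Int)

-- the common recursive characterisation of the answer, given the counts before the head
def pvG : List Char → Int → Int → Int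
  | [], _, _ => 0
  | c :: t, z, o =>
      (if c == '1' then z * pvZ t else o * pvO t)
        + pvG t (if c == '1' then z else z + 1) (if c == '1' then o + 1 else o)

-- suffix counts, recursively
def pvSufRec : List Char → List (Int × Int)
  | [] => []
  | _ :: t => (pvZ t, pvO t) :: pvSufRec t

-- the indexed third loop, as a recursion over three aligned lists
def pvSum3 : List Char → List (Int × Int) → List (Int × Int) → Int
  | c :: t, x :: p, y :: q =>
      (if c == '1' then x.1 * y.1 else x.2 * y.2) + pvSum3 t p q
  | _, _, _ => 0

theorem pvBuildPref_length (l : List Char) (z o : Int) :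
    (pvBuildPref l z o).length = l.length := by
  induction l generalizing z o with
  | nil => rfl
  | cons c t ih => simp [pvBuildPref, ih]

theorem pvBuildPref_append (a b : List Char) (z o : Int) :
    pvBuildPref (a ++ b) z o =
      pvBuildPref a z o ++ pvBuildPref b (z + pvZ a) (o + pvO a) := by
  induction a generalizing z o with
  | nil => simp [pvBuildPref, pvZ, pvO]
  | cons c t ih =>
    by_cases h : c = '1' <;>
      simp [pvBuildPref, h, ih, pvZ, pvO] <;> ring_nf

theorem pvSuf_eq (l : List Char) :
    (pvBuildPref l.reverse 0 0).reverse = pvSufRec l := by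
  induction l with
  | nil => rfl
  | cons c t ih =>
    have h1 : (c :: t).reverse = t.reverse ++ [c] := by simp
    rw [h1, pvBuildPref_append]
    have hz : pvZ t.reverse = pvZ t := by simp [pvZ]
    have ho : pvO t.reverse = pvO t := by simp [pvO]
    simp [pvBuildPref, pvSufRec, hz, ho, ih]

theorem pvEnumFold (l : List Char) (A B : List (Int × Int)) (k : Nat) (a : Int)
    (hA : A.length = k + l.length) (hB : B.length = k + l.length) :
    (PySem.List.enumerate l (k : Int)).foldl
      (fun ans ic =>
        let p := PySem.List.pyGetD A ic.1 ((0 : Int), (0 : Int))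
        let q := PySem.List.pyGetD B ic.1 ((0 : Int), (0 : Int))
        if ic.2 == '1' then ans + p.1 * q.1 else ans + p.2 * q.2) a
      = a + pvSum3 l (A.drop k) (B.drop k) := by
  induction l generalizing k a with
  | nil =>
    simp [PySem.List.enumerate_nil, pvSum3]
  | cons c t ih =>
    have hkA : k < A.length := by simp [hA]
    have hkB : k < B.length := by simp [hB]
    rw [PySem.List.enumerate_cons]
    have hk1 : ((k : Int) + 1) = ((k + 1 : Nat) : Int) := by push_cast; ring
    simp only [List.foldl_cons]
    rw [hk1, ih (k + 1) _ (by simp [hA]; omega) (by simp [hB]; omega)]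
    have hdA : A.drop k = A[k] :: A.drop (k + 1) := List.drop_eq_getElem_cons hkA
    have hdB : B.drop k = B[k] :: B.drop (k + 1) := List.drop_eq_getElem_cons hkB
    have hgA : PySem.List.pyGetD A (k : Int) ((0 : Int), (0 : Int)) = A[k] := by
      simp [PySem.List.pyGetD_natCast, List.getD_eq_getElem?_getD, hkA]
    have hgB : PySem.List.pyGetD B (k : Int) ((0 : Int), (0 : Int)) = B[k] := by
      simp [PySem.List.pyGetD_natCast, List.getD_eq_getElem?_getD, hkB]
    rw [hdA, hdB]
    simp only [pvSum3, hgA, hgB]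
    by_cases h : c = '1' <;> simp [h] <;> ring

theorem pvSum3_eq_pvG (l : List Char) (z o : Int) :
    pvSum3 l (pvBuildPref l z o) (pvSufRec l) = pvG l z o := by
  induction l generalizing z o with
  | nil => rfl
  | cons c t ih => by_cases h : c = '1' <;> simp [pvBuildPref, pvSufRec, pvSum3, pvG, h, ih]

theorem pvZ_cons (c : Char) (t : List Char) :
    pvZ (c :: t) = if c == '1' then pvZ t else pvZ t + 1 := by
  by_cases h : c = '1' <;> simp [pvZ, h]

theorem pvO_cons (c : Char) (t : List Char) :
    pvO (c :: t) = if c == '1' then pvO t + 1 else pvO t := by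
  by_cases h : c = '1' <;> simp [pvO, h]

theorem pvFoldB (tz tOne : Int) (l : List Char) (a pz po : Int)
    (hz : tz = pz + pvZ l) (ho : tOne = po + pvO l) :
    (l.foldl
      (fun st c =>
        if c == '1' then (st.1 + st.2.1 * (tz - st.2.1), st.2.1, st.2.2 + 1)
        else (st.1 + st.2.2 * (tOne - st.2.2), st.2.1 + 1, st.2.2))
      (a, pz, po)).1 = a + pvG l pz po := by
  induction l generalizing a pz po with
  | nil => simp [pvG]
  | cons c t ih =>
    rw [pvZ_cons] at hz
    rw [pvO_cons] at ho
    by_cases h : c = '1'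
    · simp only [List.foldl_cons, h]
      simp only [beq_self_eq_true, if_true]
      simp only [h, beq_self_eq_true, if_true] at hz ho
      rw [ih (a + pz * (tz - pz)) pz (po + 1) hz (by omega)]
      have : tz - pz = pvZ t := by omega
      simp [pvG, this]; ring
    · simp only [List.foldl_cons]
      have hb : (c == '1') = false := by simp [h]
      simp only [hb, Bool.false_eq_true, if_false]
      simp only [hb, Bool.false_eq_true, if_false] at hz ho
      rw [ih (a + po * (tOne - po)) (pz + 1) po (by omega) ho]
      have : tOne - po = pvO t := by omega
      simp [pvG, hb, this]; ring

theorem pvTotals (l : List Char) :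
    (l.length : Int) - l.foldl (fun a c => if c == '1' then a + 1 else a) 0 = pvZ l := by
  rw [PySem.List.foldl_beq_add_one]
  have h : l.countP (fun c => !(c == '1')) + l.count '1' = l.length := by
    induction l with
    | nil => rfl
    | cons c t ih =>
      by_cases hc : c = '1' <;> simp [hc] <;> omega
  unfold pvZ
  omega

-- ===== VERDICT (by name: the statement is the Claim_ definition above) =====
theorem solution_1531_2_spec : Claim_equal_solution_1531_2 := by
  intro s _
  unfold Spec_solution_1531_2
  have e1 : solution_1531_2 s
      = pvSum3 s.toList (pvBuildPref s.toList 0 0) ((pvBuildPref s.toList.reverse 0 0).reverse) := by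
    have h := pvEnumFold s.toList (pvBuildPref s.toList 0 0)
      ((pvBuildPref s.toList.reverse 0 0).reverse) 0 0
      (by simp [pvBuildPref_length]) (by simp [pvBuildPref_length])
    simp only [Nat.cast_zero, List.drop_zero, zero_add] at h
    exact h
  rw [e1, pvSuf_eq, pvSum3_eq_pvG]
  have ho : s.toList.foldl (fun a c => if c == '1' then a + 1 else a) 0 = 0 + pvO s.toList := by
    rw [PySem.List.foldl_beq_add_one]; rfl
  have hz : (s.toList.length : Int) - s.toList.foldl (fun a c => if c == '1' then a + 1 else a) 0
      = 0 + pvZ s.toList := by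
    rw [pvTotals]; omega
  have e2 := pvFoldB
    ((s.toList.length : Int) - s.toList.foldl (fun a c => if c == '1' then a + 1 else a) 0)
    (s.toList.foldl (fun a c => if c == '1' then a + 1 else a) 0)
    s.toList 0 0 0 hz ho
  have e2' : solution_1531_2_alt s = 0 + pvG s.toList 0 0 := e2
  rw [e2']; omega
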